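-- pv_equiv track=rewrite | github.com/FTCThunderbots/2014-Code | Script/autopushConfiguration.py | lineIsDefine
-- ===== SOURCE A (Python) =====
-- DEFINITIONS = ("setting_twoMotors", "setting_noMotors", "setting_twoEncoders",
-- 		"setting_noEncoders", "COMPASS", "INFRARED")
--
-- def lineIsDefine(line):
-- 	for definition in DEFINITIONS:
-- 		if line.startswith("#define " + definition + " "):
-- 			return True
-- 		if line == "#define " + definition:
-- 			return True
-- 		if line == "#define " + definition + "\n":
-- 			return True
-- 	return False
-- ===== SOURCE B (Python) =====
-- DEFINITIONS = ("setting_twoMotors", "setting_noMotors", "setting_twoEncoders",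
-- 		"setting_noEncoders", "COMPASS", "INFRARED")
--
-- DEFS = frozenset(DEFINITIONS)
--
-- def lineIsDefine(line):
-- 	if not line.startswith("#define "):
-- 		return False
-- 	rest = line[8:]
-- 	i = rest.find(" ")
-- 	if i != -1:
-- 		name = rest[:i]
-- 	elif rest.endswith("\n"):
-- 		name = rest[:-1]
-- 	else:
-- 		name = rest
-- 	return name in DEFS
-- ===== Notes on version B (the rewrite author's own statement) =====
-- stated objective: simpler
-- what changed: Instead of looping over all six DEFINITIONS and testing three concatenated candidate patterns per definition, B checks the define-keyword prefix once, extracts the name in a single parse (up to the first space, else minus a trailing newline), and does one frozenset membership test.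
import Mathlib
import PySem

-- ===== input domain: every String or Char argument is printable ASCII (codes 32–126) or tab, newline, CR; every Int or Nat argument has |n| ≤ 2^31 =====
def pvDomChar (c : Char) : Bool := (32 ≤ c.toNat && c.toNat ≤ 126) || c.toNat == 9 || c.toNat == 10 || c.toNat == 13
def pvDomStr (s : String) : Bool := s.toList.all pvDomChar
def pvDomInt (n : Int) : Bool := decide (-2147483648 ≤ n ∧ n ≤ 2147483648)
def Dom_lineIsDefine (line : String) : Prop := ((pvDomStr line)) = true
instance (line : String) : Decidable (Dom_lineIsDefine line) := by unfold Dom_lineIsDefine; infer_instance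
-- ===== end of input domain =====

-- B parses the line once ('#define ' prefix, then the name up to the first space or a trailing newline)
-- and does a single set lookup instead of testing three concatenated patterns per definition: simpler.

-- ===== PORT A =====
def pvDefs : List String :=
  ["setting_twoMotors", "setting_noMotors", "setting_twoEncoders",
   "setting_noEncoders", "COMPASS", "INFRARED"]

-- the for-loop with early returns, as structural recursion over DEFINITIONS
def pvCheckA (line : String) : List String → Bool
  | [] => false
  | d :: ds =>
    if PySem.Str.startswith line ("#define " ++ d ++ " ") then true
    else if line == "#define " ++ d then true
    else if line == "#define " ++ d ++ "\n" then true
    else pvCheckA line ds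

def lineIsDefine (line : String) : Bool := pvCheckA line pvDefs

-- ===== PORT B =====
-- DEFS = frozenset(DEFINITIONS)
def pvDefsSet : PySem.Set String := PySem.Set.ofList pvDefs

def lineIsDefine_alt (line : String) : Bool :=
  if !(PySem.Str.startswith line "#define ") then false
  else
    let rest := PySem.Str.slice line (some 8) none
    let i := PySem.Str.find rest " "
    let name :=
      if i != -1 then PySem.Str.slice rest none (some i)
      else if PySem.Str.endswith rest "\n" then PySem.Str.slice rest none (some (-1))
      else rest
    PySem.Set.contains pvDefsSet name

-- ===== PRECONDITION & SPEC =====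
def Spec_lineIsDefine (line : String) (out : Bool) : Prop := out = lineIsDefine_alt line
instance (line : String) (out : Bool) : Decidable (Spec_lineIsDefine line out) := by unfold Spec_lineIsDefine; infer_instance

-- ===== CLAIM (what is proved, stated in full; the proofs are below) =====
def Claim_equal_lineIsDefine : Prop := ∀ (line : String), Dom_lineIsDefine line → Spec_lineIsDefine line (lineIsDefine line)

-- ===== LEMMAS AND PROOFS =====

-- "#define " as a char list
def pvPre : List Char := "#define ".toList

-- A's acceptance condition for one definition d
def pvAcond (l : List Char) (d : String) : Prop :=
  (pvPre ++ d.toList ++ [' ']) <+: l ∨ l = pvPre ++ d.toList ∨ l = pvPre ++ d.toList ++ ['\n']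

theorem pvDefs_good : ∀ d ∈ pvDefs, (' ' ∉ d.toList) ∧ ('\n' ∉ d.toList) ∧ d.toList ≠ [] := by decide

theorem pvCheckA_iff (line : String) (ds : List String) :
    pvCheckA line ds = true ↔ ∃ d ∈ ds, pvAcond line.toList d := by
  induction ds with
  | nil => simp [pvCheckA]
  | cons d ds ih =>
    simp only [pvCheckA]
    split_ifs with h1 h2 h3
    · simp only [true_iff]
      refine ⟨d, List.mem_cons_self, Or.inl ?_⟩
      rw [PySem.Str.startswith_eq, PySem.Chars.startswith_iff] at h1
      simpa [pvPre] using h1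
    · simp only [true_iff]
      refine ⟨d, List.mem_cons_self, Or.inr (Or.inl ?_)⟩
      have := String.toList_inj.mpr (eq_of_beq h2)
      simpa [pvPre] using this
    · simp only [true_iff]
      refine ⟨d, List.mem_cons_self, Or.inr (Or.inr ?_)⟩
      have := String.toList_inj.mpr (eq_of_beq h3)
      simpa [pvPre] using this
    · rw [ih]
      constructor
      · rintro ⟨e, he, hc⟩; exact ⟨e, List.mem_cons_of_mem _ he, hc⟩
      · rintro ⟨e, he, hc⟩
        rcases List.mem_cons.mp he with rfl | he'
        · exfalso
          rcases hc with hp | hq | hr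
          · apply h1
            rw [PySem.Str.startswith_eq, PySem.Chars.startswith_iff]
            simpa [pvPre] using hp
          · apply h2
            apply beq_iff_eq.mpr
            apply String.toList_inj.mp
            simpa [pvPre] using hq
          · apply h3
            apply beq_iff_eq.mpr
            apply String.toList_inj.mp
            simpa [pvPre] using hr
        · exact ⟨e, he', hc⟩

theorem pv_single_prefix_iff (c : Char) (s : List Char) : [c] <+: s ↔ s.head? = some c := by
  cases s with
  | nil => simp
  | cons a t => simp [List.cons_prefix_iff, eq_comm]

theorem pv_single_prefix_drop (c : Char) (s : List Char) (n : Nat) :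
    [c] <+: s.drop n ↔ s[n]? = some c := by
  rw [pv_single_prefix_iff, List.head?_drop]

-- find points at the first space: on d ++ ' ' :: t with no space in d it returns d.length
theorem pv_find_space (d t : List Char) (hd : ' ' ∉ d) :
    PySem.Chars.find (d ++ ' ' :: t) [' '] = (d.length : Int) := by
  set r := d ++ ' ' :: t with hr
  have hmem : ' ' ∈ r := by simp [hr]
  have hnn : 0 ≤ PySem.Chars.find r [' '] := by
    rw [PySem.Chars.find_nonneg_iff]
    exact (List.singleton_infix_iff ' ' r).mpr hmem
  obtain ⟨hpre, hmin⟩ := PySem.Chars.find_spec hnn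
  have hget : r[(PySem.Chars.find r [' ']).toNat]? = some ' ' := (pv_single_prefix_drop _ _ _).mp hpre
  have hdl : r[d.length]? = some ' ' := by simp [hr]
  have hne : (PySem.Chars.find r [' ']).toNat = d.length := by
    rcases lt_trichotomy (PySem.Chars.find r [' ']).toNat d.length with h | h | h
    · exfalso
      have heq : r[(PySem.Chars.find r [' ']).toNat]? = d[(PySem.Chars.find r [' ']).toNat]? := by
        rw [hr, List.getElem?_append_left h]
      rw [heq] at hget
      exact hd (List.mem_of_getElem? hget)
    · exact h
    · exact absurd ((pv_single_prefix_drop _ _ _).mpr hdl) (hmin d.length h)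
  omega

theorem pv_find_no_space (r : List Char) (h : ' ' ∉ r) :
    PySem.Chars.find r [' '] = -1 := by
  rw [PySem.Chars.find_eq_neg_one_iff]
  intro hinf
  exact h ((List.singleton_infix_iff ' ' r).mp hinf)

-- B's value, on char lists, once the '#define ' prefix holds: l = pvPre ++ r
theorem pv_alt_char (line : String) (r : List Char) (hl : line.toList = pvPre ++ r) :
    lineIsDefine_alt line =
      pvDefsSet.contains (String.ofList
        (if PySem.Chars.find r [' '] != -1 then r.take (PySem.Chars.find r [' ']).toNat
         else if PySem.Chars.endswith r ['\n'] then r.dropLast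
         else r)) := by
  have hsw : PySem.Str.startswith line "#define " = true := by
    rw [PySem.Str.startswith_eq, PySem.Chars.startswith_iff]
    exact hl ▸ List.prefix_append pvPre r
  have hrest : (PySem.Str.slice line (some 8) none).toList = r := by
    rw [PySem.Str.toList_slice]
    show PySem.List.slice line.toList (some 8) none = r
    rw [PySem.List.slice_from _ (by norm_num : (0:Int) ≤ 8), hl]
    have h8 : ((8:Int)).toNat = pvPre.length := by decide
    rw [h8, List.drop_left]
  have hfind : PySem.Str.find (PySem.Str.slice line (some 8) none) " " =
      PySem.Chars.find r [' '] := by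
    rw [PySem.Str.find_eq, hrest]; rfl
  have hend : PySem.Str.endswith (PySem.Str.slice line (some 8) none) "\n" =
      PySem.Chars.endswith r ['\n'] := by
    rw [PySem.Str.endswith_eq, hrest]; rfl
  unfold lineIsDefine_alt
  rw [hsw]
  simp only [Bool.not_true, Bool.false_eq_true, if_false, hfind, hend]
  by_cases hf : PySem.Chars.find r [' '] != -1
  · have hnn : 0 ≤ PySem.Chars.find r [' '] := by
      have := PySem.Chars.neg_one_le_find r [' ']
      simp only [bne_iff_ne, ne_eq] at hf
      omega
    have hs12 : PySem.Str.slice (PySem.Str.slice line (some 8) none) none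
        (some (PySem.Chars.find r [' '])) =
        String.ofList (r.take (PySem.Chars.find r [' ']).toNat) := by
      apply String.toList_inj.mp
      rw [PySem.Str.toList_slice, String.toList_ofList]
      show PySem.List.slice _ none (some _) = _
      rw [hrest, PySem.List.slice_to _ hnn]
    simp only [hf, if_true, hs12]
  · by_cases he : PySem.Chars.endswith r ['\n'] = true
    · have hs13 : PySem.Str.slice (PySem.Str.slice line (some 8) none) none (some (-1)) =
          String.ofList r.dropLast := by
        apply String.toList_inj.mp
        rw [PySem.Str.toList_slice, String.toList_ofList]
        show PySem.List.slice _ none (some _) = _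
        rw [hrest, PySem.List.slice_to_neg_one]
      have hsr : PySem.Str.slice line (some 8) none = String.ofList r := by
        apply String.toList_inj.mp
        rw [hrest, String.toList_ofList]
      rw [Bool.not_eq_true] at hf
      simp only [hf, Bool.false_eq_true, if_false, he, if_true, hs13]
    · have hsr : PySem.Str.slice line (some 8) none = String.ofList r := by
        apply String.toList_inj.mp
        rw [hrest, String.toList_ofList]
      rw [Bool.not_eq_true] at hf he
      simp only [hf, he, Bool.false_eq_true, if_false, hsr]

theorem pv_contains_iff (s : String) : pvDefsSet.contains s = true ↔ s ∈ pvDefs := by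
  rw [PySem.Set.contains_iff, pvDefsSet, PySem.Set.mem_ofList]

-- main equivalence on the startswith-true branch
theorem pv_main (line : String) (r : List Char) (hl : line.toList = pvPre ++ r) :
    lineIsDefine line = lineIsDefine_alt line := by
  rw [pv_alt_char line r hl]
  set name : String := String.ofList
      (if PySem.Chars.find r [' '] != -1 then r.take (PySem.Chars.find r [' ']).toNat
       else if PySem.Chars.endswith r ['\n'] then r.dropLast
       else r) with hname
  rw [show lineIsDefine line = pvCheckA line pvDefs from rfl]
  rw [Bool.eq_iff_iff, pvCheckA_iff, pv_contains_iff]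
  constructor
  · -- A accepts via some d → the parsed name is d
    rintro ⟨d, hdmem, hcond⟩
    obtain ⟨hds, hdn, _⟩ := pvDefs_good d hdmem
    have hnd : name = d := by
      apply String.toList_inj.mp
      rw [hname, String.toList_ofList]
      rcases hcond with hp | hq | hr'
      · obtain ⟨t, ht⟩ := hp
        have hrdt : r = d.toList ++ ' ' :: t := by
          have h2 : pvPre ++ (d.toList ++ ' ' :: t) = pvPre ++ r := by
            rw [hl] at ht; simpa [List.append_assoc] using ht
          exact (List.append_cancel_left h2).symm
        rw [hrdt, pv_find_space d.toList t hds]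
        simp
      · have hrd : r = d.toList := by
          rw [hl] at hq
          exact List.append_cancel_left hq
        rw [hrd, pv_find_no_space _ hds]
        have hend : PySem.Chars.endswith d.toList ['\n'] = false := by
          rw [Bool.eq_false_iff, ne_eq, PySem.Chars.endswith_iff]
          intro hsuf
          exact hdn (hsuf.subset (by simp))
        simp [hend]
      · have hrd : r = d.toList ++ ['\n'] := by
          rw [hl, List.append_assoc] at hr'
          exact List.append_cancel_left hr'
        subst hrd
        have hnos : ' ' ∉ d.toList ++ ['\n'] := by simp [hds]
        have hend : PySem.Chars.endswith (d.toList ++ ['\n']) ['\n'] = true := by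
          rw [PySem.Chars.endswith_iff]
          exact ⟨d.toList, rfl⟩
        rw [pv_find_no_space _ hnos]
        simp [hend]
    rw [hnd]
    exact hdmem
  · -- the parsed name is a definition → A accepts via that definition
    intro hmem
    refine ⟨name, hmem, ?_⟩
    have hnl : name.toList =
        (if PySem.Chars.find r [' '] != -1 then r.take (PySem.Chars.find r [' ']).toNat
         else if PySem.Chars.endswith r ['\n'] then r.dropLast
         else r) := by rw [hname, String.toList_ofList]
    by_cases hf : PySem.Chars.find r [' '] != -1
    · -- a space occurs: r = name ++ ' ' :: tail, so the startswith pattern matches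
      left
      have hnn : 0 ≤ PySem.Chars.find r [' '] := by
        have := PySem.Chars.neg_one_le_find r [' ']
        simp only [bne_iff_ne, ne_eq] at hf
        omega
      obtain ⟨hpre, _⟩ := PySem.Chars.find_spec hnn
      have hget : r[(PySem.Chars.find r [' ']).toNat]? = some ' ' :=
        (pv_single_prefix_drop _ _ _).mp hpre
      have hlt : (PySem.Chars.find r [' ']).toNat < r.length :=
        (List.getElem?_eq_some_iff.mp hget).1
      have hdrop : r.drop (PySem.Chars.find r [' ']).toNat =
          ' ' :: r.drop ((PySem.Chars.find r [' ']).toNat + 1) := by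
        rw [List.drop_eq_getElem_cons hlt]
        have hg : r[(PySem.Chars.find r [' ']).toNat] = ' ' := by
          have := List.getElem?_eq_getElem hlt
          rw [this] at hget; exact Option.some_inj.mp hget
        rw [hg]
      have hr : r = name.toList ++ ' ' :: r.drop ((PySem.Chars.find r [' ']).toNat + 1) := by
        rw [hnl, if_pos hf, ← hdrop, List.take_append_drop]
      rw [hl, hr]
      exact ⟨r.drop ((PySem.Chars.find r [' ']).toNat + 1), by simp⟩
    · by_cases he : PySem.Chars.endswith r ['\n'] = true
      · -- no space, trailing newline: r = name ++ ['\n']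
        right; right
        obtain ⟨s, hs⟩ := (PySem.Chars.endswith_iff r ['\n']).mp he
        have hns : name.toList = s := by
          rw [hnl, if_neg hf, if_pos he, ← hs]
          exact List.dropLast_concat ..
        rw [hl, ← hs, hns, List.append_assoc]
      · -- no space, no trailing newline: r = name
        right; left
        have hnr : name.toList = r := by
          rw [hnl, if_neg hf, if_neg he]
        rw [hl, hnr]

-- ===== VERDICT (by name: the statement is the Claim_ definition above) =====
theorem lineIsDefine_spec : Claim_equal_lineIsDefine := by
  intro line _
  unfold Spec_lineIsDefine
  by_cases hs : PySem.Str.startswith line "#define " = true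
  · rw [PySem.Str.startswith_eq, PySem.Chars.startswith_iff] at hs
    obtain ⟨r, hr⟩ := hs
    exact pv_main line r hr.symm
  · -- no '#define ' prefix: both sides are false
    have hs' := Bool.eq_false_iff.mpr hs
    have hb : lineIsDefine_alt line = false := by
      unfold lineIsDefine_alt
      rw [hs']
      rfl
    rw [hb]
    rw [show lineIsDefine line = pvCheckA line pvDefs from rfl]
    rw [Bool.eq_false_iff, ne_eq, pvCheckA_iff]
    rintro ⟨d, _, hcond⟩
    apply hs
    rw [PySem.Str.startswith_eq, PySem.Chars.startswith_iff]
    show pvPre <+: line.toList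
    rcases hcond with hp | hq | hr
    · exact ((pvPre.prefix_append (d.toList ++ [' '])).trans
        (by rw [← List.append_assoc]; exact hp))
    · rw [hq]; exact List.prefix_append pvPre _
    · rw [hr, List.append_assoc]; exact List.prefix_append pvPre _
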